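-- pv_equiv track=rewrite | github.com/manudiv16/AoC_2019 | day4/day4.py | hasrep
-- ===== SOURCE A (Python) =====
-- def hasrep(x):
--     number = str(x)
--     new = []
--     for n in number:
--         if n in new:
--             return True
--         else:
--             new.append(n)
--     return False
-- ===== SOURCE B (Python) =====
-- def hasrep(x):
--     s = str(x)
--     return len(set(s)) != len(s)
-- ===== Notes on version B (the rewrite author's own statement) =====
-- stated objective: simpler
-- what changed: Replaces the left-to-right scan with an incremental seen-list, membership test and early return by a single cardinality comparison: a repeated digit exists iff len(set(str(x))) != len(str(x)).
import Mathlib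
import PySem

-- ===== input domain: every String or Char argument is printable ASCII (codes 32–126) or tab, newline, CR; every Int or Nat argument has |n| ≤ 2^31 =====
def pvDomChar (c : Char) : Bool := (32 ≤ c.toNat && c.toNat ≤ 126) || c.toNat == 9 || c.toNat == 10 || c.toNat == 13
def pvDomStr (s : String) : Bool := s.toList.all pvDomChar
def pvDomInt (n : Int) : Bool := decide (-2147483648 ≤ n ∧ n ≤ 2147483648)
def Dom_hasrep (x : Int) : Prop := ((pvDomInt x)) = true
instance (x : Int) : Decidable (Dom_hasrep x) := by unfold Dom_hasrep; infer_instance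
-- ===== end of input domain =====

-- B replaces A's scan-with-seen-list-and-early-return by one cardinality comparison
-- len(set(s)) != len(s); equal on every input (both total).

-- ===== PORT A =====
-- the for-loop over str(x) with the growing 'new' list and early 'return True'
def hasrepLoop : List Char → List Char → Bool
  | [], _ => false
  | n :: rest, new => if new.contains n then true else hasrepLoop rest (new ++ [n])

def hasrep (x : Int) : Bool := hasrepLoop (PySem.Int.toChars x) []

-- ===== PORT B =====
def hasrep_alt (x : Int) : Bool :=
  let s := PySem.Int.toChars x
  decide ((PySem.Set.ofList s).length ≠ s.length)

-- ===== PRECONDITION & SPEC =====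
def Spec_hasrep (x : Int) (out : Bool) : Prop := out = hasrep_alt x
instance (x : Int) (out : Bool) : Decidable (Spec_hasrep x out) := by unfold Spec_hasrep; infer_instance

-- ===== CLAIM (what is proved, stated in full; the proofs are below) =====
def Claim_equal_hasrep : Prop := ∀ (x : Int), Dom_hasrep x → Spec_hasrep x (hasrep x)

-- ===== LEMMAS AND PROOFS =====

theorem foldl_add_length_le (cs acc : List Char) :
    (cs.foldl PySem.Set.add acc).length ≤ acc.length + cs.length := by
  induction cs generalizing acc with
  | nil => simp
  | cons c rest ih =>
    simp only [List.foldl_cons, List.length_cons]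
    calc (rest.foldl PySem.Set.add (PySem.Set.add acc c)).length
        ≤ (PySem.Set.add acc c).length + rest.length := ih _
      _ ≤ acc.length + (rest.length + 1) := by
          rw [PySem.Set.add_eq_ite]
          split <;> simp <;> omega

theorem foldl_add_length_eq_iff (cs acc : List Char) (hacc : acc.Nodup) :
    (cs.foldl PySem.Set.add acc).length = acc.length + cs.length ↔ (acc ++ cs).Nodup := by
  induction cs generalizing acc with
  | nil => simp [hacc]
  | cons c rest ih =>
    simp only [List.foldl_cons]
    by_cases hc : c ∈ acc
    · rw [PySem.Set.add_of_mem hc]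
      constructor
      · intro h
        have := foldl_add_length_le rest acc
        simp only [List.length_cons] at h
        omega
      · intro h
        exact absurd ((List.nodup_append.mp h).2.2 c hc c (List.mem_cons_self) rfl) (by simp)
    · rw [PySem.Set.add_of_not_mem hc]
      have h1 : (acc ++ [c]).Nodup := List.nodup_append.mpr
        ⟨hacc, List.nodup_singleton c,
          fun a ha b hb heq => hc (by rw [List.mem_singleton] at hb; rw [← hb, ← heq]; exact ha)⟩
      rw [show acc ++ c :: rest = (acc ++ [c]) ++ rest by simp, ← ih _ h1]
      simp only [List.length_append, List.length_cons, List.length_nil]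
      omega

theorem hasrepLoop_eq (cs acc : List Char) (hacc : acc.Nodup) :
    hasrepLoop cs acc = decide (¬ (acc ++ cs).Nodup) := by
  induction cs generalizing acc with
  | nil => simp [hasrepLoop, hacc]
  | cons c rest ih =>
    simp only [hasrepLoop]
    by_cases hc : c ∈ acc
    · simp only [List.contains_eq_mem, hc, decide_true, if_true]
      have : ¬ (acc ++ c :: rest).Nodup :=
        fun h => (List.nodup_append.mp h).2.2 c hc c (List.mem_cons_self) rfl
      simp [this]
    · simp only [List.contains_eq_mem, hc, decide_false, Bool.false_eq_true, if_false]
      have h1 : (acc ++ [c]).Nodup := List.nodup_append.mpr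
        ⟨hacc, List.nodup_singleton c,
          fun a ha b hb heq => hc (by rw [List.mem_singleton] at hb; rw [← hb, ← heq]; exact ha)⟩
      rw [ih _ h1, show (acc ++ [c]) ++ rest = acc ++ (c :: rest) by simp]

-- ===== VERDICT (by name: the statement is the Claim_ definition above) =====
theorem hasrep_spec : Claim_equal_hasrep := by
  intro x _
  unfold Spec_hasrep hasrep hasrep_alt
  rw [hasrepLoop_eq _ _ List.nodup_nil]
  simp only [List.nil_append]
  rw [PySem.Set.ofList_eq_foldl]
  by_cases h : (PySem.Int.toChars x).Nodup
  · have := (foldl_add_length_eq_iff (PySem.Int.toChars x) [] List.nodup_nil).mpr (by simpa using h)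
    simp at this
    simp [h, this]
  · have hne : ((PySem.Int.toChars x).foldl PySem.Set.add []).length ≠ (PySem.Int.toChars x).length := by
      intro heq
      exact h (by simpa using (foldl_add_length_eq_iff (PySem.Int.toChars x) [] List.nodup_nil).mp (by simpa using heq))
    simp [h, hne]
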